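-- pv_equiv track=rewrite | github.com/avinod-kumar-au9/DSA-Questions | histogram,finding next greater element and area of water stacking.py | solve
-- ===== SOURCE A (Python) =====
-- def solve(arr):
--     ans = 0
--     for i in range(0,len(arr)):
--         right_blocking_idx = -1
--         left_blocking_idx = -1
--
--         for right in range(i+1, len(arr)):
--             if arr[i] < arr[right]:
--                 right_blocking_idx = right
--                 break
--
--         for left in range(i-1, -1, -1):
--             if arr[i] < arr[left]:
--                 left_blocking_idx = left
--                 break
--
--         if left_blocking_idx == -1 or right_blocking_idx == -1:
--             ans += 0
--         else:
--             height = min(arr[right_blocking_idx], arr[left_blocking_idx]) - arr[i]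
--             breadth = abs(right_blocking_idx - left_blocking_idx) - 1
--             ans += height * breadth
--
--     return ans
-- ===== SOURCE B (Python) =====
-- def solve(arr):
--     n = len(arr)
--     right = [-1] * n
--     stack = []
--     for i in range(n):
--         while stack and arr[stack[-1]] < arr[i]:
--             right[stack.pop()] = i
--         stack.append(i)
--     left = [-1] * n
--     stack = []
--     for i in range(n - 1, -1, -1):
--         while stack and arr[stack[-1]] < arr[i]:
--             left[stack.pop()] = i
--         stack.append(i)
--     ans = 0
--     for i in range(n):
--         l, r = left[i], right[i]
--         if l != -1 and r != -1:
--             ans += (min(arr[l], arr[r]) - arr[i]) * (r - l - 1)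
--     return ans
-- ===== Notes on version B (the rewrite author's own statement) =====
-- stated objective: faster
-- what changed: Replaced A's per-index linear scans for the nearest strictly greater element on each side (O(n^2)) by two monotonic-stack passes that precompute all nearest-greater indices, then one O(1)-per-index summation pass.
import Mathlib
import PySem

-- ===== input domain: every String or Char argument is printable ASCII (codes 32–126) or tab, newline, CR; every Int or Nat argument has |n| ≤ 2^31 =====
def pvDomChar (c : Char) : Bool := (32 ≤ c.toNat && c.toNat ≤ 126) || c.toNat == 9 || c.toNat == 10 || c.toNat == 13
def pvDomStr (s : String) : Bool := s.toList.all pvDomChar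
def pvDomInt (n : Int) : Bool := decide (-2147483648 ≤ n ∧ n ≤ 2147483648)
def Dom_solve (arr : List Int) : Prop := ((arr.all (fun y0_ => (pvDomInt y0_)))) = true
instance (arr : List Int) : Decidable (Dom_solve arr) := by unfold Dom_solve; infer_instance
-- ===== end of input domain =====

-- B replaces A's per-index linear scans for the nearest strictly greater neighbour on each side
-- by two monotonic-stack passes precomputing all of them, then one summation pass.

-- arr[j] for an index both programs only use in range: exact there (Python never sees j out of range)
def get0 (arr : List Int) (j : Nat) : Int := arr.getD j 0

-- ===== PORT A =====
-- A's inner 'for …: if arr[i] < arr[j]: idx = j; break' loop: first index j in js with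
-- v < arr[j], else -1 (js is the index list of the Python range).
def aScan (arr : List Int) (v : Int) : List Nat → Int
  | [] => -1
  | j :: js => if v < get0 arr j then (j : Int) else aScan arr v js

def solve (arr : List Int) : Int :=
  (List.range arr.length).foldl (fun ans i =>
    let r := aScan arr (get0 arr i) (List.range' (i+1) (arr.length - (i+1)))
    let l := aScan arr (get0 arr i) (List.range i).reverse
    if l = -1 ∨ r = -1 then ans
    else ans + (min (get0 arr r.toNat) (get0 arr l.toNat) - get0 arr i) *
          (((r - l).natAbs : Int) - 1)) 0

-- ===== PORT B =====
-- B's result arrays 'right'/'left' (initialised to -1) are ported as total maps Nat → Int.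
def updFn (res : Nat → Int) (t : Nat) (v : Int) : Nat → Int :=
  fun k => if k = t then v else res k

-- B's 'while stack and arr[stack[-1]] < arr[i]: res[stack.pop()] = i' loop.
def popAssign (arr : List Int) (v : Int) (i : Nat) :
    List Nat → (Nat → Int) → List Nat × (Nat → Int)
  | [], res => ([], res)
  | t :: s, res =>
      if get0 arr t < v then popAssign arr v i s (updFn res t (i : Int))
      else (t :: s, res)

-- one iteration of B's 'for i in …' stack loop (pop loop, then 'stack.append(i)')
def passStep (arr : List Int) (st : List Nat × (Nat → Int)) (i : Nat) :
    List Nat × (Nat → Int) :=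
  let p := popAssign arr (get0 arr i) i st.1 st.2
  (i :: p.1, p.2)

def bpass (arr : List Int) (idxs : List Nat) : List Nat × (Nat → Int) :=
  idxs.foldl (passStep arr) ([], fun _ => -1)

def solve_alt (arr : List Int) : Int :=
  (List.range arr.length).foldl (fun ans i =>
    let l := (bpass arr (List.range arr.length).reverse).2 i
    let r := (bpass arr (List.range arr.length)).2 i
    if l ≠ -1 ∧ r ≠ -1 then
      ans + (min (get0 arr l.toNat) (get0 arr r.toNat) - get0 arr i) * (r - l - 1)
    else ans) 0

-- ===== PRECONDITION & SPEC =====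
def Spec_solve (arr : List Int) (out : Int) : Prop := out = solve_alt arr
instance (arr : List Int) (out : Int) : Decidable (Spec_solve arr out) := by unfold Spec_solve; infer_instance

-- ===== CLAIM (what is proved, stated in full; the proofs are below) =====
def Claim_equal_solve : Prop := ∀ (arr : List Int), Dom_solve arr → Spec_solve arr (solve arr)

-- ===== LEMMAS AND PROOFS =====

-- A's two scan results per index (A's own loops, reused as the specification that
-- B's stack passes are proved to compute).
def ngrI (arr : List Int) (t : Nat) : Int :=
  aScan arr (get0 arr t) (List.range' (t+1) (arr.length - (t+1)))
def nglI (arr : List Int) (t : Nat) : Int :=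
  aScan arr (get0 arr t) (List.range t).reverse

lemma aScan_append_of_none (arr : List Int) (v : Int) (js1 js2 : List Nat)
    (h : ∀ j ∈ js1, ¬ v < get0 arr j) :
    aScan arr v (js1 ++ js2) = aScan arr v js2 := by
  induction js1 with
  | nil => rfl
  | cons j js ih =>
      rw [List.cons_append, aScan, if_neg (h j (List.mem_cons_self ..))]
      exact ih (fun j hj => h j (List.mem_cons_of_mem _ hj))

lemma aScan_eq_neg_one (arr : List Int) (v : Int) (js : List Nat)
    (h : ∀ j ∈ js, ¬ v < get0 arr j) :
    aScan arr v js = -1 := by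
  have := aScan_append_of_none arr v js [] h
  simpa using this

lemma aScan_cases (arr : List Int) (v : Int) (js : List Nat) :
    aScan arr v js = -1 ∨ ∃ j ∈ js, aScan arr v js = (j : Int) := by
  induction js with
  | nil => left; rfl
  | cons j js ih =>
      by_cases h : v < get0 arr j
      · right
        exact ⟨j, List.mem_cons_self .., by rw [aScan, if_pos h]⟩
      · rcases ih with h1 | ⟨j', hj', hv⟩
        · left; rw [aScan, if_neg h]; exact h1
        · right
          exact ⟨j', List.mem_cons_of_mem _ hj', by rw [aScan, if_neg h]; exact hv⟩

-- the pop loop, characterised by takeWhile / dropWhile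
lemma popAssign_fst (arr : List Int) (v : Int) (i : Nat) (st : List Nat) (res : Nat → Int) :
    (popAssign arr v i st res).1 = st.dropWhile (fun t => decide (get0 arr t < v)) := by
  induction st generalizing res with
  | nil => rfl
  | cons t s ih =>
      by_cases h : get0 arr t < v
      · rw [popAssign, if_pos h, ih, List.dropWhile_cons_of_pos (by simpa using h)]
      · rw [popAssign, if_neg h, List.dropWhile_cons_of_neg (by simpa using h)]

lemma popAssign_snd (arr : List Int) (v : Int) (i : Nat) (st : List Nat) (res : Nat → Int)
    (t' : Nat) :
    (popAssign arr v i st res).2 t' =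
      if t' ∈ st.takeWhile (fun t => decide (get0 arr t < v)) then (i : Int) else res t' := by
  induction st generalizing res with
  | nil => rfl
  | cons t s ih =>
      by_cases h : get0 arr t < v
      · rw [popAssign, if_pos h, ih, List.takeWhile_cons_of_pos (by simpa using h)]
        by_cases ht : t' ∈ s.takeWhile (fun t => decide (get0 arr t < v))
        · rw [if_pos ht, if_pos (List.mem_cons_of_mem _ ht)]
        · by_cases he : t' = t
          · rw [if_neg ht, if_pos (List.mem_cons.mpr (Or.inl he)), updFn, if_pos he]
          · rw [if_neg ht, if_neg (by
              intro hm
              rcases List.mem_cons.mp hm with h' | h' <;> [exact he h'; exact ht h']),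
              updFn, if_neg he]
      · rw [popAssign, if_neg h, List.takeWhile_cons_of_neg (by simpa using h)]
        simp

lemma takeWhile_eq_filter_of_pairwise {α} (p : α → Bool) (l : List α)
    (h : l.Pairwise (fun a b => p a = false → p b = false)) :
    l.takeWhile p = l.filter p ∧ l.dropWhile p = l.filter (fun x => !p x) := by
  induction l with
  | nil => exact ⟨rfl, rfl⟩
  | cons a t ih =>
      rcases List.pairwise_cons.mp h with ⟨ha, ht⟩
      by_cases hp : p a
      · have := ih ht
        rw [List.takeWhile_cons_of_pos hp, List.dropWhile_cons_of_pos hp,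
          List.filter_cons_of_pos hp, List.filter_cons_of_neg (by simp [hp]),
          this.1, this.2]
        exact ⟨rfl, rfl⟩
      · have hp' : p a = false := by simpa using hp
        have hall : ∀ b ∈ t, p b = false := fun b hb => ha b hb hp'
        have h1 : t.filter p = [] := List.filter_eq_nil_iff.mpr (by
          intro b hb; simp [hall b hb])
        have h2 : t.filter (fun x => !p x) = t := List.filter_eq_self.mpr (by
          intro b hb; simp [hall b hb])
        rw [List.takeWhile_cons_of_neg (by simp [hp']),
          List.dropWhile_cons_of_neg (by simp [hp']),
          List.filter_cons_of_neg (by simp [hp']),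
          List.filter_cons_of_pos (by simp [hp']), h1, h2]
        exact ⟨rfl, rfl⟩

-- ------- right pass: invariant -------
def RInv (arr : List Int) (k : Nat) (st : List Nat) (res : Nat → Int) : Prop :=
  (∀ t ∈ st, t < k) ∧
  st.Pairwise (· > ·) ∧
  (∀ t, t < k → (t ∈ st ↔ ∀ j, t < j → j < k → get0 arr j ≤ get0 arr t)) ∧
  (∀ t, t < k → t ∉ st → res t = ngrI arr t) ∧
  (∀ t ∈ st, res t = -1) ∧
  (∀ t, k ≤ t → res t = -1)

lemma rinv_step (arr : List Int) (k : Nat) (st : List Nat) (res : Nat → Int)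
    (hk : k < arr.length) (h : RInv arr k st res) :
    RInv arr (k+1) (passStep arr (st, res) k).1 (passStep arr (st, res) k).2 := by
  obtain ⟨hb, hpw, hmem, hres, hstk, hrest⟩ := h
  set p : Nat → Bool := fun t => decide (get0 arr t < get0 arr k) with hp
  have hmono : st.Pairwise (fun a b => p a = false → p b = false) := by
    refine hpw.imp_of_mem ?_
    intro a b ha hb' hab hpa
    have hak : a < k := hb a ha
    have hbk : b < k := hb b hb'
    have hle : get0 arr a ≤ get0 arr b := ((hmem b hbk).mp hb') a hab hak
    simp only [hp, decide_eq_false_iff_not, not_lt] at hpa ⊢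
    exact le_trans hpa hle
  obtain ⟨htw, hdw⟩ := takeWhile_eq_filter_of_pairwise p st hmono
  have hfst : (passStep arr (st, res) k).1 = k :: st.filter (fun x => !p x) := by
    show k :: (popAssign arr (get0 arr k) k st res).1 = _
    rw [popAssign_fst, ← hp, hdw]
  have hsnd : ∀ t', (passStep arr (st, res) k).2 t' =
      if t' ∈ st.filter p then (k : Int) else res t' := by
    intro t'
    show (popAssign arr (get0 arr k) k st res).2 t' = _
    rw [popAssign_snd, ← hp, htw]
  rw [hfst]
  refine ⟨?_, ?_, ?_, ?_, ?_, ?_⟩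
  · intro t ht
    rcases List.mem_cons.mp ht with rfl | ht
    · omega
    · exact Nat.lt_succ_of_lt (hb t (List.mem_of_mem_filter ht))
  · refine List.pairwise_cons.mpr ⟨?_, hpw.filter _⟩
    intro t ht; exact hb t (List.mem_of_mem_filter ht)
  · intro t htk
    by_cases he : t = k
    · subst he
      constructor
      · intro _ j hj hj'; omega
      · intro _; exact List.mem_cons.mpr (Or.inl rfl)
    · have htk' : t < k := by omega
      constructor
      · intro ht j hj hjk
        have ht' : t ∈ st.filter (fun x => !p x) := by
          rcases List.mem_cons.mp ht with h' | h'
          · exact absurd h' he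
          · exact h'
        have hts : t ∈ st := List.mem_of_mem_filter ht'
        have hnp : p t = false := by
          have := List.of_mem_filter ht'
          simpa using this
        by_cases hjk' : j = k
        · subst hjk'
          simp only [hp, decide_eq_false_iff_not, not_lt] at hnp
          exact hnp
        · exact ((hmem t htk').mp hts) j hj (by omega)
      · intro hall
        have hts : t ∈ st := (hmem t htk').mpr (fun j hj hjk => hall j hj (by omega))
        have hnp : p t = false := by
          simp only [hp, decide_eq_false_iff_not, not_lt]
          exact hall k htk' (by omega)
        exact List.mem_cons_of_mem _ (List.mem_filter.mpr ⟨hts, by simp [hnp]⟩)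
  · intro t htk hnew
    rw [hsnd]
    have he : t ≠ k := fun h => hnew (List.mem_cons.mpr (Or.inl h))
    have htk' : t < k := by omega
    by_cases hts : t ∈ st
    · by_cases hpt : p t = true
      · -- t is popped now: its nearest greater to the right is k
        rw [if_pos (List.mem_filter.mpr ⟨hts, hpt⟩)]
        have hall : ∀ j, t < j → j < k → get0 arr j ≤ get0 arr t := (hmem t htk').mp hts
        have hv : get0 arr t < get0 arr k := by simpa [hp] using hpt
        have hsplit : List.range' (t+1) (arr.length - (t+1)) =
            List.range' (t+1) (k - (t+1)) ++ List.range' k (arr.length - k) := by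
          have h2 : arr.length - (t+1) = (k - (t+1)) + (arr.length - k) := by omega
          have h1 : (t+1) + (k - (t+1)) = k := by omega
          rw [h2, ← List.range'_append_1, h1]
        unfold ngrI
        rw [hsplit, aScan_append_of_none arr _ _ _ (by
          intro j hj
          have := List.mem_range'_1.mp hj
          exact not_lt.mpr (hall j (by omega) (by omega)))]
        have hrk : List.range' k (arr.length - k) =
            k :: List.range' (k+1) (arr.length - (k+1)) := by
          have h3 : arr.length - k = (arr.length - (k+1)) + 1 := by omega
          rw [h3, List.range'_succ]
        rw [hrk, aScan, if_pos hv]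
      · exfalso
        exact hnew (List.mem_cons_of_mem _
          (List.mem_filter.mpr ⟨hts, by simp [eq_false_of_ne_true hpt]⟩))
    · rw [if_neg (fun hfm => hts (List.mem_of_mem_filter hfm))]
      exact hres t htk' hts
  · intro t ht
    rw [hsnd]
    rcases List.mem_cons.mp ht with rfl | ht'
    · rw [if_neg (fun hfm => by
        have := hb t (List.mem_of_mem_filter hfm); omega)]
      exact hrest t le_rfl
    · have hts : t ∈ st := List.mem_of_mem_filter ht'
      have hnp : p t = false := by
        have := List.of_mem_filter ht'; simpa using this
      rw [if_neg (fun hfm => by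
        have := List.of_mem_filter hfm; rw [hnp] at this; exact absurd this (by simp))]
      exact hstk t hts
  · intro t ht
    rw [hsnd, if_neg (fun hfm => by
      have := hb t (List.mem_of_mem_filter hfm); omega)]
    exact hrest t (by omega)

lemma rinv_state (arr : List Int) :
    ∀ k, k ≤ arr.length →
      RInv arr k ((List.range k).foldl (passStep arr) ([], fun _ => -1)).1
        ((List.range k).foldl (passStep arr) ([], fun _ => -1)).2 := by
  intro k
  induction k with
  | zero =>
      intro _
      refine ⟨by simp, by simp, fun t ht => absurd ht (by omega),
        fun t ht => absurd ht (by omega), by simp, fun _ _ => rfl⟩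
  | succ k ih =>
      intro hk
      have hk' : k < arr.length := by omega
      rw [List.range_succ, List.foldl_append]
      have := rinv_step arr k _ _ hk' (ih (le_of_lt hk'))
      simpa using this

lemma right_eq (arr : List Int) (t : Nat) (ht : t < arr.length) :
    (bpass arr (List.range arr.length)).2 t = ngrI arr t := by
  obtain ⟨hb, hpw, hmem, hres, hstk, hrest⟩ := rinv_state arr arr.length le_rfl
  unfold bpass
  by_cases hts : t ∈ ((List.range arr.length).foldl (passStep arr) ([], fun _ => -1)).1
  · rw [hstk t hts]
    have hall := (hmem t ht).mp hts
    symm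
    refine aScan_eq_neg_one arr _ _ ?_
    intro j hj
    have := List.mem_range'_1.mp hj
    exact not_lt.mpr (hall j (by omega) (by omega))
  · exact hres t ht hts

-- ------- left pass: invariant (indices processed from n-1 down to m) -------
def LInv (arr : List Int) (m : Nat) (st : List Nat) (res : Nat → Int) : Prop :=
  (∀ t ∈ st, m ≤ t ∧ t < arr.length) ∧
  st.Pairwise (· < ·) ∧
  (∀ t, m ≤ t → t < arr.length →
    (t ∈ st ↔ ∀ j, m ≤ j → j < t → get0 arr j ≤ get0 arr t)) ∧
  (∀ t, m ≤ t → t < arr.length → t ∉ st → res t = nglI arr t) ∧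
  (∀ t ∈ st, res t = -1) ∧
  (∀ t, t < m → res t = -1)

lemma linv_step (arr : List Int) (m : Nat) (st : List Nat) (res : Nat → Int)
    (hm : m < arr.length) (h : LInv arr (m+1) st res) :
    LInv arr m (passStep arr (st, res) m).1 (passStep arr (st, res) m).2 := by
  obtain ⟨hb, hpw, hmem, hres, hstk, hrest⟩ := h
  set p : Nat → Bool := fun t => decide (get0 arr t < get0 arr m) with hp
  have hmono : st.Pairwise (fun a b => p a = false → p b = false) := by
    refine hpw.imp_of_mem ?_
    intro a b ha hb' hab hpa
    obtain ⟨ham, han⟩ := hb a ha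
    obtain ⟨hbm, hbn⟩ := hb b hb'
    have hle : get0 arr a ≤ get0 arr b := ((hmem b hbm hbn).mp hb') a ham hab
    simp only [hp, decide_eq_false_iff_not, not_lt] at hpa ⊢
    exact le_trans hpa hle
  obtain ⟨htw, hdw⟩ := takeWhile_eq_filter_of_pairwise p st hmono
  have hfst : (passStep arr (st, res) m).1 = m :: st.filter (fun x => !p x) := by
    show m :: (popAssign arr (get0 arr m) m st res).1 = _
    rw [popAssign_fst, ← hp, hdw]
  have hsnd : ∀ t', (passStep arr (st, res) m).2 t' =
      if t' ∈ st.filter p then (m : Int) else res t' := by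
    intro t'
    show (popAssign arr (get0 arr m) m st res).2 t' = _
    rw [popAssign_snd, ← hp, htw]
  rw [hfst]
  refine ⟨?_, ?_, ?_, ?_, ?_, ?_⟩
  · intro t ht
    rcases List.mem_cons.mp ht with rfl | ht
    · exact ⟨le_rfl, hm⟩
    · have := hb t (List.mem_of_mem_filter ht); omega
  · refine List.pairwise_cons.mpr ⟨?_, hpw.filter _⟩
    intro t ht; have := hb t (List.mem_of_mem_filter ht); omega
  · intro t htm htn
    by_cases he : t = m
    · subst he
      constructor
      · intro _ j hj hj'; omega
      · intro _; exact List.mem_cons.mpr (Or.inl rfl)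
    · have htm' : m + 1 ≤ t := by omega
      constructor
      · intro ht j hjm hjt
        have ht' : t ∈ st.filter (fun x => !p x) := by
          rcases List.mem_cons.mp ht with h' | h'
          · exact absurd h' he
          · exact h'
        have hts : t ∈ st := List.mem_of_mem_filter ht'
        have hnp : p t = false := by
          have := List.of_mem_filter ht'; simpa using this
        by_cases hjm' : j = m
        · subst hjm'
          simp only [hp, decide_eq_false_iff_not, not_lt] at hnp
          exact hnp
        · exact ((hmem t htm' htn).mp hts) j (by omega) hjt
      · intro hall
        have hts : t ∈ st := (hmem t htm' htn).mpr (fun j hj hjt => hall j (by omega) hjt)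
        have hnp : p t = false := by
          simp only [hp, decide_eq_false_iff_not, not_lt]
          exact hall m le_rfl (by omega)
        exact List.mem_cons_of_mem _ (List.mem_filter.mpr ⟨hts, by simp [hnp]⟩)
  · intro t htm htn hnew
    rw [hsnd]
    have he : t ≠ m := fun h => hnew (List.mem_cons.mpr (Or.inl h))
    have htm' : m + 1 ≤ t := by omega
    by_cases hts : t ∈ st
    · by_cases hpt : p t = true
      · -- t is popped now: its nearest greater to the left is m
        rw [if_pos (List.mem_filter.mpr ⟨hts, hpt⟩)]
        have hall : ∀ j, m + 1 ≤ j → j < t → get0 arr j ≤ get0 arr t :=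
          (hmem t htm' htn).mp hts
        have hv : get0 arr t < get0 arr m := by simpa [hp] using hpt
        have hsplit : (List.range t).reverse =
            (List.range' (m+1) (t - (m+1))).reverse ++ m :: (List.range m).reverse := by
          have h1 : List.range t = List.range m ++ List.range' m (t - m) := by
            rw [List.range_eq_range', List.range_eq_range']
            have hra : List.range' 0 m ++ List.range' (0+m) (t - m) =
                List.range' 0 (m + (t - m)) := List.range'_append_1
            rw [Nat.zero_add] at hra
            rw [hra]
            congr 1
            omega
          have h2 : List.range' m (t - m) = m :: List.range' (m+1) (t - (m+1)) := by
            have : t - m = (t - (m+1)) + 1 := by omega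
            rw [this, List.range'_succ]
          rw [h1, h2]
          simp
        unfold nglI
        rw [hsplit, aScan_append_of_none arr _ _ _ (by
          intro j hj
          rw [List.mem_reverse] at hj
          have := List.mem_range'_1.mp hj
          exact not_lt.mpr (hall j (by omega) (by omega)))]
        rw [aScan, if_pos hv]
      · exfalso
        exact hnew (List.mem_cons_of_mem _
          (List.mem_filter.mpr ⟨hts, by simp [eq_false_of_ne_true hpt]⟩))
    · rw [if_neg (fun hfm => hts (List.mem_of_mem_filter hfm))]
      exact hres t htm' htn hts
  · intro t ht
    rw [hsnd]
    rcases List.mem_cons.mp ht with rfl | ht'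
    · rw [if_neg (fun hfm => by
        have := hb t (List.mem_of_mem_filter hfm); omega)]
      exact hrest t (by omega)
    · have hts : t ∈ st := List.mem_of_mem_filter ht'
      have hnp : p t = false := by
        have := List.of_mem_filter ht'; simpa using this
      rw [if_neg (fun hfm => by
        have := List.of_mem_filter hfm; rw [hnp] at this; exact absurd this (by simp))]
      exact hstk t hts
  · intro t ht
    rw [hsnd, if_neg (fun hfm => by
      have := hb t (List.mem_of_mem_filter hfm); omega)]
    exact hrest t (by omega)

lemma linv_state (arr : List Int) :
    ∀ d m, m + d = arr.length →
      LInv arr m (((List.range' m (arr.length - m)).reverse).foldl (passStep arr)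
          ([], fun _ => -1)).1
        (((List.range' m (arr.length - m)).reverse).foldl (passStep arr)
          ([], fun _ => -1)).2 := by
  intro d
  induction d with
  | zero =>
      intro m hm
      have h0 : arr.length - m = 0 := by omega
      rw [h0]
      refine ⟨by simp, by simp, fun t htm htn => absurd htn (by omega),
        fun t htm htn _ => absurd htn (by omega), by simp, fun _ _ => rfl⟩
  | succ d ih =>
      intro m hm
      have hmn : m < arr.length := by omega
      have hsplit : List.range' m (arr.length - m) =
          m :: List.range' (m+1) (arr.length - (m+1)) := by
        have : arr.length - m = (arr.length - (m+1)) + 1 := by omega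
        rw [this, List.range'_succ]
      rw [hsplit]
      simp only [List.reverse_cons, List.foldl_append, List.foldl_cons, List.foldl_nil]
      have := linv_step arr m _ _ hmn (ih (m+1) (by omega))
      simpa using this

lemma left_eq (arr : List Int) (t : Nat) (ht : t < arr.length) :
    (bpass arr (List.range arr.length).reverse).2 t = nglI arr t := by
  obtain ⟨hb, hpw, hmem, hres, hstk, hrest⟩ := linv_state arr arr.length 0 (by omega)
  rw [Nat.sub_zero] at hmem hres hstk
  show (((List.range arr.length).reverse).foldl (passStep arr) ([], fun _ => -1)).2 t =
    nglI arr t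
  rw [List.range_eq_range']
  by_cases hts : t ∈ (((List.range' 0 arr.length).reverse).foldl (passStep arr)
      ([], fun _ => -1)).1
  · rw [hstk t hts]
    have hall := (hmem t (by omega) ht).mp hts
    symm
    refine aScan_eq_neg_one arr _ _ ?_
    intro j hj
    rw [List.mem_reverse, List.mem_range] at hj
    exact not_lt.mpr (hall j (by omega) hj)
  · exact hres t (by omega) ht hts

-- per-index agreement of the two summation bodies
lemma body_eq (arr : List Int) (i : Nat) (hi : i < arr.length) (ans : Int) :
    (if nglI arr i = -1 ∨ ngrI arr i = -1 then ans
     else ans + (min (get0 arr (ngrI arr i).toNat) (get0 arr (nglI arr i).toNat) - get0 arr i) *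
            (((ngrI arr i - nglI arr i).natAbs : Int) - 1)) =
    (let l := (bpass arr (List.range arr.length).reverse).2 i
     let r := (bpass arr (List.range arr.length)).2 i
     if l ≠ -1 ∧ r ≠ -1 then
       ans + (min (get0 arr l.toNat) (get0 arr r.toNat) - get0 arr i) * (r - l - 1)
     else ans) := by
  simp only [left_eq arr i hi, right_eq arr i hi]
  by_cases hrn : ngrI arr i = -1
  · rw [if_pos (Or.inr hrn), if_neg (by tauto)]
  · by_cases hln : nglI arr i = -1
    · rw [if_pos (Or.inl hln), if_neg (by tauto)]
    · have hr' : (i : Int) < ngrI arr i := by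
        rcases aScan_cases arr (get0 arr i) (List.range' (i+1) (arr.length - (i+1)))
          with h1 | ⟨j, hj, hv⟩
        · exact absurd h1 hrn
        · have hj' := List.mem_range'_1.mp hj
          show (i : Int) < aScan arr (get0 arr i) (List.range' (i+1) (arr.length - (i+1)))
          rw [hv]
          have : i < j := by omega
          exact_mod_cast this
      have hl' : nglI arr i < (i : Int) ∧ 0 ≤ nglI arr i := by
        rcases aScan_cases arr (get0 arr i) (List.range i).reverse
          with h1 | ⟨j, hj, hv⟩
        · exact absurd h1 hln
        · rw [List.mem_reverse, List.mem_range] at hj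
          show aScan arr (get0 arr i) (List.range i).reverse < (i : Int) ∧
            0 ≤ aScan arr (get0 arr i) (List.range i).reverse
          rw [hv]
          exact ⟨by exact_mod_cast hj, by exact_mod_cast Nat.zero_le j⟩
      rw [if_neg (by tauto), if_pos ⟨hln, hrn⟩, min_comm]
      congr 1
      congr 1
      omega

-- ===== VERDICT (by name: the statement is the Claim_ definition above) =====
theorem solve_spec : Claim_equal_solve := by
  intro arr _
  unfold Spec_solve solve solve_alt
  refine PySem.List.foldl_congr_mem _ _ _ _ ?_
  intro ans i hi
  exact body_eq arr i (List.mem_range.mp hi) ans
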